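-- pv_equiv track=rewrite | github.com/DancingOnAir/LeetcodePythonSolution | two_pointers/SlidingWindow/3255_find_the_power_of_k-size_subarrays_ii.py | resultsArray1
-- ===== SOURCE A (Python) =====
-- from typing import List
--
-- def resultsArray1(nums: List[int], k: int) -> List[int]:
--     res = [-1] * (len(nums) - k + 1)
--     cnt = 0
--     for i, x in enumerate(nums):
--         if i == 0 or x == nums[i - 1] + 1:
--             cnt += 1
--         else:
--             cnt = 1
--
--         if cnt >= k:
--             res[i - k + 1] = x
--
--     return res
-- ===== SOURCE B (Python) =====
-- from typing import List
--
-- def _fill(res, nums, k, s, e):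
--     # segment [s, e] is maximal consecutive-ascending; emit its windows
--     if e - s + 1 >= k:
--         for p in range(s + k - 1, e + 1):
--             res[p - k + 1] = nums[p]
--
-- def resultsArray1(nums: List[int], k: int) -> List[int]:
--     n = len(nums)
--     res = [-1] * (n - k + 1)
--     s = 0
--     for i in range(1, n):
--         if nums[i] != nums[i - 1] + 1:
--             _fill(res, nums, k, s, i - 1)
--             s = i
--     if n > 0:
--         _fill(res, nums, k, s, n - 1)
--     return res
-- ===== Notes on version B (the rewrite author's own statement) =====
-- stated objective: alternative
-- what changed: Replaces A's running-counter scan (ascending-run length tracked per element, one guarded write per index) by a segment decomposition: find maximal consecutive-ascending segments, then bulk-fill the answer slots of each closed segment; restricted to the problem's natural domain k >= 1.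
-- outside the precondition, e.g. on resultsArray1([1, 2], 0): A returns [-1, 1, 2], B returns [2, 1, 2]; on resultsArray1([5], -1): A returns [-1, -1, 5], B raises IndexError
import Mathlib
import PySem

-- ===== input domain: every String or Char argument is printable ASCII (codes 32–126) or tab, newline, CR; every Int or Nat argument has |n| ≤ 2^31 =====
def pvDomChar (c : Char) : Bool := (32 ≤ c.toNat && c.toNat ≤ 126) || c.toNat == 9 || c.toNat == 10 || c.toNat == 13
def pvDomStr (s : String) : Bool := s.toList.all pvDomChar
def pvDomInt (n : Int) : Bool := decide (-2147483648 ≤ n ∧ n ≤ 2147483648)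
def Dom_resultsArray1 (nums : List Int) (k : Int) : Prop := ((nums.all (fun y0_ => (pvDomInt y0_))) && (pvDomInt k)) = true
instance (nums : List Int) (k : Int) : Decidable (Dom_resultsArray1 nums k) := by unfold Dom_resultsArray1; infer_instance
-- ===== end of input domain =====

-- B replaces A's running-counter scan by a maximal-ascending-segment decomposition with a
-- bulk fill per segment (objective: alternative decomposition, same O(n) cost).

-- ===== PORT A =====
def resultsArray1 (nums : List Int) (k : Int) : List Int :=
  let res0 : List Int := List.replicate (((nums.length : Int) - k + 1).toNat) (-1)
  ((PySem.List.enumerate nums 0).foldl (fun (st : List Int × Int) (ix : Int × Int) =>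
      let cnt' : Int :=
        if ix.1 = 0 ∨ ix.2 = PySem.List.pyGetD nums (ix.1 - 1) 0 + 1 then st.2 + 1 else 1
      let res' : List Int :=
        if cnt' ≥ k then st.1.set (ix.1 - k + 1).toNat ix.2 else st.1
      (res', cnt')) (res0, 0)).1

-- ===== PORT B =====
-- helper `_fill` of Source B: write the windows of closed segment [s, e]
def fillSeg (nums : List Int) (k s e : Int) (res : List Int) : List Int :=
  if e - s + 1 ≥ k then
    (PySem.List.pyRange (s + k - 1) (e + 1) 1).foldl
      (fun r p => r.set (p - k + 1).toNat (PySem.List.pyGetD nums p 0)) res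
  else res

def resultsArray1_alt (nums : List Int) (k : Int) : List Int :=
  let n : Int := (nums.length : Int)
  let res0 : List Int := List.replicate (n - k + 1).toNat (-1)
  let st := (PySem.List.pyRange 1 n 1).foldl (fun (st : List Int × Int) (i : Int) =>
      if PySem.List.pyGetD nums i 0 ≠ PySem.List.pyGetD nums (i - 1) 0 + 1 then
        (fillSeg nums k st.2 (i - 1) st.1, i)
      else st) (res0, 0)
  if n > 0 then fillSeg nums k st.2 (n - 1) st.1 else st.1

-- ===== PRECONDITION & SPEC =====
-- Pre_ restricts to the problem's natural domain (the task guarantees 1 ≤ k);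
-- for k ≤ 0 A still returns a degenerate padded list that is an artefact of its
-- negative-length arithmetic, and B's segment fill raises there.
def Pre_resultsArray1 (nums : List Int) (k : Int) : Prop := 1 ≤ k
instance (nums : List Int) (k : Int) : Decidable (Pre_resultsArray1 nums k) := by
  unfold Pre_resultsArray1; infer_instance

def pvWitness_resultsArray1 : List Int × Int := ([1, 2, 3, 2, 3, 4], 3)

def Spec_resultsArray1 (nums : List Int) (k : Int) (out : List Int) : Prop := out = resultsArray1_alt nums k
instance (nums : List Int) (k : Int) (out : List Int) : Decidable (Spec_resultsArray1 nums k out) := by unfold Spec_resultsArray1; infer_instance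

-- ===== CLAIM (what is proved, stated in full; the proofs are below) =====
def Claim_equal_resultsArray1 : Prop := ∀ (nums : List Int) (k : Int), Dom_resultsArray1 nums k → Pre_resultsArray1 nums k → Spec_resultsArray1 nums k (resultsArray1 nums k)

-- ===== LEMMAS AND PROOFS =====

-- value of nums at a Nat index, through the ports' pyGetD
def gvN (nums : List Int) (p : Nat) : Int := PySem.List.pyGetD nums (p : Int) 0

-- start index of the maximal consecutive-ascending segment containing i
def segStart (nums : List Int) : Nat → Nat
  | 0 => 0
  | i + 1 => if gvN nums (i + 1) = gvN nums i + 1 then segStart nums i else i + 1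

lemma segStart_le (nums : List Int) (i : Nat) : segStart nums i ≤ i := by
  induction i with
  | zero => simp [segStart]
  | succ i ih => unfold segStart; split <;> omega

lemma segStart_between (nums : List Int) (i p : Nat)
    (h1 : segStart nums i ≤ p) (h2 : p ≤ i) : segStart nums p = segStart nums i := by
  induction i with
  | zero =>
    have hp : p = 0 := by omega
    subst hp; rfl
  | succ i ih =>
    have hs : segStart nums (i + 1)
        = if gvN nums (i + 1) = gvN nums i + 1 then segStart nums i else i + 1 := rfl
    by_cases h : gvN nums (i + 1) = gvN nums i + 1
    · rw [hs, if_pos h] at h1 ⊢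
      rcases Nat.lt_or_ge p (i + 1) with hp | hp
      · exact ih h1 (by omega)
      · have hpe : p = i + 1 := by omega
        subst hpe; rw [hs, if_pos h]
    · rw [hs, if_neg h] at h1 ⊢
      have hpe : p = i + 1 := by omega
      subst hpe; rw [hs, if_neg h]

-- the common normal form: the guarded writes, one per qualifying index, in index order
def wrN (nums : List Int) (kn : Nat) (r : List Int) (p : Nat) : List Int :=
  r.set (p + 1 - kn) (gvN nums p)

def WL (nums : List Int) (kn : Nat) (l : List Nat) (r : List Int) : List Int :=
  (l.filter (fun p => segStart nums p + kn ≤ p + 1)).foldl (wrN nums kn) r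

-- A's cnt after processing m elements
def cntAt (nums : List Int) (m : Nat) : Int :=
  match m with
  | 0 => 0
  | i + 1 => (i : Int) - segStart nums i + 1

lemma WL_append (nums : List Int) (kn : Nat) (l1 l2 : List Nat) (r : List Int) :
    WL nums kn (l1 ++ l2) r = WL nums kn l2 (WL nums kn l1 r) := by
  simp [WL, List.filter_append, List.foldl_append]

-- ===== A-side: the scan equals the common normal form =====

lemma A_inv (nums : List Int) (k : Int) (hk : 1 ≤ k) (res0 : List Int) (m : Nat)
    (hm : m ≤ nums.length) :
    (PySem.List.pyRange 0 (m : Int) 1).foldl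
      (fun (st : List Int × Int) (j : Int) =>
        let cnt' : Int :=
          if j = 0 ∨ PySem.List.pyGetD nums j 0 = PySem.List.pyGetD nums (j - 1) 0 + 1
          then st.2 + 1 else 1
        let res' : List Int :=
          if cnt' ≥ k then st.1.set (j - k + 1).toNat (PySem.List.pyGetD nums j 0) else st.1
        (res', cnt')) (res0, 0)
      = (WL nums k.toNat (List.range m) res0, cntAt nums m) := by
  induction m with
  | zero =>
    rw [PySem.List.pyRange_one_eq_nil (by omega)]
    simp [WL, cntAt]
  | succ m ih =>
    have hcast : ((m + 1 : Nat) : Int) = (m : Int) + 1 := by push_cast; ring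
    rw [hcast, PySem.List.pyRange_one_succ_right (by omega), List.foldl_append,
      ih (by omega)]
    simp only [List.foldl_cons, List.foldl_nil]
    have hks : (k.toNat : Int) = k := by omega
    -- the cnt update
    have hcnt :
        (if (m : Int) = 0 ∨ PySem.List.pyGetD nums (m : Int) 0 = PySem.List.pyGetD nums ((m : Int) - 1) 0 + 1
         then cntAt nums m + 1 else 1) = cntAt nums (m + 1) := by
      cases m with
      | zero => simp [cntAt, segStart]
      | succ i =>
        have h1 : ((i + 1 : Nat) : Int) ≠ 0 := by omega
        have h2 : ((i + 1 : Nat) : Int) - 1 = (i : Nat) := by push_cast; ring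
        by_cases h : gvN nums (i + 1) = gvN nums i + 1
        · have : ((i + 1 : Nat) : Int) = 0 ∨
              PySem.List.pyGetD nums ((i + 1 : Nat) : Int) 0 =
                PySem.List.pyGetD nums (((i + 1 : Nat) : Int) - 1) 0 + 1 := by
            right; rw [h2]; exact h
          rw [if_pos this]
          simp only [cntAt, segStart, if_pos h]
          have := segStart_le nums i
          push_cast; omega
        · have : ¬ (((i + 1 : Nat) : Int) = 0 ∨
              PySem.List.pyGetD nums ((i + 1 : Nat) : Int) 0 =
                PySem.List.pyGetD nums (((i + 1 : Nat) : Int) - 1) 0 + 1) := by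
            rw [h2]
            rintro (hc | hc)
            · exact h1 hc
            · exact h hc
          rw [if_neg this]
          simp only [cntAt, segStart, if_neg h]
          push_cast; ring
    rw [hcnt]
    -- the write
    have hWL : WL nums k.toNat (List.range (m + 1)) res0 =
        (if cntAt nums (m + 1) ≥ k
         then (WL nums k.toNat (List.range m) res0).set ((m : Int) - k + 1).toNat (PySem.List.pyGetD nums (m : Int) 0)
         else WL nums k.toNat (List.range m) res0) := by
      rw [List.range_succ, WL_append]
      have hg : (decide (segStart nums m + k.toNat ≤ m + 1) = true) ↔ cntAt nums (m + 1) ≥ k := by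
        simp only [cntAt, decide_eq_true_eq]
        omega
      by_cases hc : cntAt nums (m + 1) ≥ k
      · rw [if_pos hc]
        have : List.filter (fun p => segStart nums p + k.toNat ≤ p + 1) [m] = [m] := by
          simp only [List.filter_cons, List.filter_nil]
          rw [if_pos (hg.mpr hc)]
        simp only [WL] at this ⊢
        rw [this]
        simp only [List.foldl_cons, List.foldl_nil, wrN, gvN]
        congr 1
        omega
      · rw [if_neg hc]
        have : List.filter (fun p => segStart nums p + k.toNat ≤ p + 1) [m] = [] := by
          simp only [List.filter_cons, List.filter_nil]
          rw [if_neg (by simp only [hg]; exact hc)]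
        simp only [WL] at this ⊢
        rw [this]
        simp
    rw [hWL]

-- ===== B-side: the segment fill equals the common normal form =====

lemma fillSeg_eq_WL (nums : List Int) (k : Int) (hk : 1 ≤ k) (s e1 : Nat) (r : List Int)
    (hse : s ≤ e1) (hseg : ∀ p, s ≤ p → p < e1 → segStart nums p = s) :
    fillSeg nums k (s : Int) ((e1 : Int) - 1) r = WL nums k.toNat (List.range' s (e1 - s)) r := by
  unfold fillSeg WL
  by_cases hlen : (e1 : Int) - 1 - s + 1 ≥ k
  · rw [if_pos hlen]
    rw [show e1 - s = (k.toNat - 1) + (e1 - s - (k.toNat - 1)) from by omega,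
      ← List.range'_append, List.filter_append]
    simp only [one_mul]
    have hf1 : List.filter (fun p => decide (segStart nums p + k.toNat ≤ p + 1))
        (List.range' s (k.toNat - 1)) = [] := by
      apply List.filter_eq_nil_iff.mpr
      intro q hq
      simp only [List.mem_range'] at hq
      obtain ⟨i, hi, rfl⟩ := hq
      rw [hseg _ (by omega) (by omega)]
      simp only [decide_eq_true_eq]
      omega
    have hf2 : List.filter (fun p => decide (segStart nums p + k.toNat ≤ p + 1))
        (List.range' (s + (k.toNat - 1)) (e1 - s - (k.toNat - 1)))
        = List.range' (s + (k.toNat - 1)) (e1 - s - (k.toNat - 1)) := by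
      apply List.filter_eq_self.mpr
      intro q hq
      simp only [List.mem_range'] at hq
      obtain ⟨i, hi, rfl⟩ := hq
      rw [hseg _ (by omega) (by omega)]
      simp only [decide_eq_true_eq]
      omega
    rw [hf1, hf2, List.nil_append, PySem.List.pyRange_one]
    rw [show (((e1 : Int) - 1 + 1) - ((s : Int) + k - 1)).toNat
        = e1 - s - (k.toNat - 1) from by omega]
    rw [List.range'_eq_map_range, List.foldl_map, List.foldl_map]
    apply List.foldl_ext
    intro a x hx
    simp only [List.mem_range] at hx
    simp only [wrN, gvN]
    have h1 : (s : Int) + k - 1 + (x : Int) = ((s + (k.toNat - 1) + x : Nat) : Int) := by omega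
    rw [h1]
    congr 1
    omega
  · rw [if_neg hlen]
    have : List.filter (fun p => decide (segStart nums p + k.toNat ≤ p + 1))
        (List.range' s (e1 - s)) = [] := by
      apply List.filter_eq_nil_iff.mpr
      intro q hq
      simp only [List.mem_range'] at hq
      obtain ⟨i, hi, rfl⟩ := hq
      rw [hseg _ (by omega) (by omega)]
      simp only [decide_eq_true_eq]
      omega
    rw [this]
    rfl

lemma B_inv (nums : List Int) (k : Int) (hk : 1 ≤ k) :
    ∀ (m j s : Nat) (r : List Int), j = nums.length - m → 1 ≤ j → j ≤ nums.length →
    segStart nums (j - 1) = s →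
    (fun (st : List Int × Int) =>
        fillSeg nums k st.2 ((nums.length : Int) - 1) st.1)
      ((PySem.List.pyRange (j : Int) (nums.length : Int) 1).foldl
        (fun (st : List Int × Int) (i : Int) =>
          if PySem.List.pyGetD nums i 0 ≠ PySem.List.pyGetD nums (i - 1) 0 + 1 then
            (fillSeg nums k st.2 (i - 1) st.1, i)
          else st) (r, (s : Int)))
      = WL nums k.toNat (List.range' s (nums.length - s)) r := by
  intro m
  induction m with
  | zero =>
    intro j s r hj h1 h2 hseg
    have hjn : j = nums.length := by omega
    subst hjn
    rw [PySem.List.pyRange_one_eq_nil (by omega)]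
    simp only [List.foldl_nil]
    have := fillSeg_eq_WL nums k hk s nums.length r (by have := segStart_le nums (nums.length - 1); omega)
      (fun p hp1 hp2 => by
        rw [← hseg]
        exact segStart_between nums (nums.length - 1) p (by rw [hseg]; exact hp1) (by omega))
    exact this
  | succ m ih =>
    intro j s r hj h1 h2 hseg
    rcases Nat.eq_or_lt_of_le h2 with hjn | hjn
    · subst hjn
      rw [PySem.List.pyRange_one_eq_nil (by omega)]
      simp only [List.foldl_nil]
      exact fillSeg_eq_WL nums k hk s nums.length r
        (by have := segStart_le nums (nums.length - 1); omega)
        (fun p hp1 hp2 => by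
          rw [← hseg]
          exact segStart_between nums (nums.length - 1) p (by rw [hseg]; exact hp1) (by omega))
    · rw [PySem.List.pyRange_one_cons (by omega)]
      simp only [List.foldl_cons]
      have hj1 : ((j : Int)) - 1 = ((j - 1 : Nat) : Int) := by omega
      have hsle : s ≤ j - 1 := by rw [← hseg]; exact segStart_le nums (j - 1)
      by_cases hbr : PySem.List.pyGetD nums ((j : Nat) : Int) 0 =
          PySem.List.pyGetD nums (((j : Nat) : Int) - 1) 0 + 1
      · rw [if_neg (by simpa using hbr)]
        have hsegj : segStart nums j = s := by
          have hj' : j = (j - 1) + 1 := by omega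
          rw [hj']
          unfold segStart
          rw [if_pos (by
            show gvN nums (j - 1 + 1) = gvN nums (j - 1) + 1
            unfold gvN
            rw [show ((j - 1 + 1 : Nat) : Int) = (j : Nat) by omega,
              show ((j - 1 : Nat) : Int) = ((j : Nat) : Int) - 1 by omega]
            exact hbr)]
          exact hseg
        have := ih (j + 1) s r (by omega) (by omega) (by omega) (by simpa using hsegj)
        rw [show ((j + 1 : Nat) : Int) = (j : Int) + 1 from by omega] at this
        beta_reduce at this ⊢
        exact this
      · rw [if_pos (by simpa using hbr)]
        have hsegj : segStart nums j = j := by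
          have hj' : j = (j - 1) + 1 := by omega
          conv_lhs => rw [hj']
          unfold segStart
          rw [if_neg (by
            show ¬ gvN nums (j - 1 + 1) = gvN nums (j - 1) + 1
            unfold gvN
            rw [show ((j - 1 + 1 : Nat) : Int) = (j : Nat) by omega,
              show ((j - 1 : Nat) : Int) = ((j : Nat) : Int) - 1 by omega]
            exact hbr)]
          omega
        have := ih (j + 1) j (fillSeg nums k (s : Int) ((j : Int) - 1) r)
          (by omega) (by omega) (by omega) (by simpa using hsegj)
        rw [show ((j + 1 : Nat) : Int) = (j : Int) + 1 from by omega] at this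
        beta_reduce at this ⊢
        rw [this]
        have hsplit : List.range' s (nums.length - s) =
            List.range' s (j - s) ++ List.range' j (nums.length - j) := by
          have h : List.range' s (j - s) 1 ++ List.range' (s + 1 * (j - s)) (nums.length - j) 1
              = List.range' s ((j - s) + (nums.length - j)) 1 := List.range'_append
          simp only [one_mul] at h
          rw [show s + (j - s) = j from by omega] at h
          rw [h]
          congr 1
          omega
        rw [hsplit, WL_append]
        congr 1
        have := fillSeg_eq_WL nums k hk s j r (by omega)
          (fun p hp1 hp2 => by
            rw [← hseg]
            exact segStart_between nums (j - 1) p (by rw [hseg]; exact hp1) (by omega))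
        rw [hj1]
        rw [hj1] at this
        exact this

-- ===== VERDICT (by name: the statement is the Claim_ definition above) =====
theorem resultsArray1_spec : Claim_equal_resultsArray1 := by
  intro nums k _ hk
  unfold Spec_resultsArray1 resultsArray1 resultsArray1_alt
  simp only []
  rw [PySem.List.enumerate_eq_map_pyRange (d := 0), List.foldl_map]
  have hA := A_inv nums k hk (List.replicate (((nums.length : Int) - k + 1).toNat) (-1))
    nums.length (le_refl _)
  rcases Nat.eq_zero_or_pos nums.length with hn | hn
  · rw [hn] at hA ⊢
    simp only [Nat.cast_zero] at hA ⊢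
    rw [if_neg (by omega)]
    rw [show (PySem.List.len nums) = ((nums.length : Int)) from by simp [PySem.List.len], hn]
    simp only [Nat.cast_zero]
    rw [hA]
    simp [WL]
  · rw [show (PySem.List.len nums) = ((nums.length : Int)) from by simp [PySem.List.len]]
    rw [hA]
    rw [if_pos (by exact_mod_cast hn)]
    have hB := B_inv nums k hk (nums.length - 1) 1 0
      (List.replicate (((nums.length : Int) - k + 1).toNat) (-1))
      (by omega) (by omega) (by omega) (by simp [segStart])
    simp only [Nat.cast_one, Nat.cast_zero] at hB
    rw [hB]
    rw [show List.range' 0 (nums.length - 0) = List.range nums.length from by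
      simp [List.range_eq_range']]
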